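-- pv_equiv track=rewrite | github.com/smrmodares/LSH-CC | main/Heuristics+LSH.py | fast_score
-- ===== SOURCE A (Python) =====
-- def fast_score(data, cluster):
--     score = 0
--     nodes = len(data)
--     for i in (range(nodes)):
--         for j in range(i + 1, nodes):
--             # if i and j are similar and not in a same cluster
--             if data[i][j] == 1:
--                 # and not in the same cluster
--                 if cluster[i] != cluster[j]: score -= 1
--             # else if they are not similar
--             else:
--                 # and in the same cluster
--                 if cluster[i] == cluster[j]: score -= 1
--
--     return score
-- ===== SOURCE B (Python) =====
-- def fast_score(data, cluster):
--     n = len(data)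
--     # cluster sizes over the labels actually used by the n nodes
--     counts = {}
--     for lab in cluster[:n]:
--         counts[lab] = counts.get(lab, 0) + 1
--     # closed-form number of same-cluster unordered pairs
--     same_pairs = sum(c * (c - 1) // 2 for c in counts.values())
--     # one upper-triangle scan: count edges, and edges inside a cluster
--     edges = 0
--     within = 0
--     for i in range(n):
--         for j in range(i + 1, n):
--             if data[i][j] == 1:
--                 edges += 1
--                 if cluster[i] == cluster[j]:
--                     within += 1
--     return -(edges + same_pairs - 2 * within)
-- ===== Notes on version B (the rewrite author's own statement) =====
-- stated objective: alternative
-- what changed: Replaces A's per-pair four-way branch (penalising each cross-cluster edge and each same-cluster non-edge) by counting cluster sizes once in a dict, deriving the number S of same-cluster pairs in closed form as sum of size*(size-1)//2, counting edges E and within-cluster edges W in a single upper-triangle scan that never compares cluster labels on non-edges, and returning -(E + S - 2*W).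
import Mathlib
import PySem

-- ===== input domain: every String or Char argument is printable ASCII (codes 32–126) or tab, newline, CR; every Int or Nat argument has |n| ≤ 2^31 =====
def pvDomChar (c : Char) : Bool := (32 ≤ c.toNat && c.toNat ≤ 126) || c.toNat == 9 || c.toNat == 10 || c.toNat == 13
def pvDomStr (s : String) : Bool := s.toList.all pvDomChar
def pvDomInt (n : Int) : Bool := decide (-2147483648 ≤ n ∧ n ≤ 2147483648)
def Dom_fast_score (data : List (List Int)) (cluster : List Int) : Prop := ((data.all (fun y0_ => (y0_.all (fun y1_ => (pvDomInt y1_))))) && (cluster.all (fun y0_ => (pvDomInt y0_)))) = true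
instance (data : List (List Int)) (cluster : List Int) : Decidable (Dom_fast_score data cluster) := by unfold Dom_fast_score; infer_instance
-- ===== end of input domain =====

-- B replaces A's per-pair four-way branch by a cluster-size dict giving the same-cluster
-- pair count in closed form plus one edge-counting upper-triangle scan (alternative
-- decomposition, same asymptotic cost).


-- ===== PORT A =====
def fast_score (data : List (List Int)) (cluster : List Int) : Int :=
  let score : Int := 0
  let nodes : Int := data.length
  (PySem.List.pyRange 0 nodes 1).foldl (fun score i =>
    (PySem.List.pyRange (i + 1) nodes 1).foldl (fun score j =>
      if PySem.List.pyGetD (PySem.List.pyGetD data i []) j 0 == 1 then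
        (if PySem.List.pyGetD cluster i 0 != PySem.List.pyGetD cluster j 0 then score - 1 else score)
      else
        (if PySem.List.pyGetD cluster i 0 == PySem.List.pyGetD cluster j 0 then score - 1 else score))
      score) score

-- ===== PORT B =====
def fast_score_alt (data : List (List Int)) (cluster : List Int) : Int :=
  let n : Int := data.length
  let counts : PySem.Dict Int Int :=
    (PySem.List.slice cluster none (some n)).foldl
      (fun d lab => d.insert lab (d.getD lab 0 + 1)) PySem.Dict.empty
  let samePairs : Int := (counts.values.map (fun c => PySem.Int.floordiv (c * (c - 1)) 2)).sum
  let ew : Int × Int :=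
    (PySem.List.pyRange 0 n 1).foldl (fun ew i =>
      (PySem.List.pyRange (i + 1) n 1).foldl (fun ew j =>
        if PySem.List.pyGetD (PySem.List.pyGetD data i []) j 0 == 1 then
          (ew.1 + 1, if PySem.List.pyGetD cluster i 0 == PySem.List.pyGetD cluster j 0 then ew.2 + 1 else ew.2)
        else ew) ew) (0, 0);
  -(ew.1 + samePairs - 2 * ew.2)

-- ===== PRECONDITION & SPEC =====
-- Pre_ is exactly where Python A returns: with 2 or more nodes every pair (i,j), i<j, is
-- visited, so cluster needs at least `len(data)` labels and every row except the last
-- (row n-1 is never indexed) needs at least `len(data)` entries; with 0 or 1 nodes A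
-- performs no indexing and always returns.
def Pre_fast_score (data : List (List Int)) (cluster : List Int) : Prop :=
  2 ≤ data.length →
    (data.length ≤ cluster.length ∧ ∀ row ∈ data.dropLast, data.length ≤ row.length)
instance (data : List (List Int)) (cluster : List Int) : Decidable (Pre_fast_score data cluster) := by
  unfold Pre_fast_score; infer_instance

def pvWitness_fast_score : List (List Int) × List Int :=
  ([[0, 1, 0], [1, 0, 1], [0, 1, 0]], [1, 1, 2])

def Spec_fast_score (data : List (List Int)) (cluster : List Int) (out : Int) : Prop := out = fast_score_alt data cluster
instance (data : List (List Int)) (cluster : List Int) (out : Int) : Decidable (Spec_fast_score data cluster out) := by unfold Spec_fast_score; infer_instance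

-- ===== CLAIM (what is proved, stated in full; the proofs are below) =====
def Claim_equal_fast_score : Prop := ∀ (data : List (List Int)) (cluster : List Int), Dom_fast_score data cluster → Pre_fast_score data cluster → Spec_fast_score data cluster (fast_score data cluster)

-- ===== LEMMAS AND PROOFS =====

-- per-pair indicators: edge, same cluster, and A's per-pair contribution
def pvE (data : List (List Int)) (i j : Int) : Bool :=
  PySem.List.pyGetD (PySem.List.pyGetD data i []) j 0 == 1
def pvS (cluster : List Int) (i j : Int) : Bool :=
  PySem.List.pyGetD cluster i 0 == PySem.List.pyGetD cluster j 0
def pvGA (data : List (List Int)) (cluster : List Int) (i j : Int) : Int :=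
  if pvE data i j then (if pvS cluster i j then 0 else -1) else (if pvS cluster i j then -1 else 0)
def pvF1 (data : List (List Int)) (i j : Int) : Int := if pvE data i j then 1 else 0
def pvF2 (data : List (List Int)) (cluster : List Int) (i j : Int) : Int :=
  if pvE data i j then (if pvS cluster i j then 1 else 0) else 0
def pvG0 (cluster : List Int) (i j : Int) : Int := if pvS cluster i j then 1 else 0

-- number of unordered same-label pairs of a list
def pvSp : List Int → Nat
  | [] => 0
  | x :: xs => xs.count x + pvSp xs

theorem pvSumIte (x : Int) (c : Nat) (D : List Int) (hD : D.Nodup) :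
    (D.map (fun k => if k = x then c else 0)).sum = if x ∈ D then c else 0 := by
  induction D with
  | nil => simp
  | cons d D ih =>
    rcases List.nodup_cons.mp hD with ⟨hd, hD'⟩
    by_cases hdx : d = x
    · subst hdx; simp [ih hD', hd]
    · simp [hdx, ih hD', show ¬x = d from fun h => hdx h.symm]

theorem pvChooseSum (D : List Int) (hD : D.Nodup) :
    ∀ (L : List Int), (∀ x ∈ L, x ∈ D) →
      (D.map (fun k => (L.count k).choose 2)).sum = pvSp L := by
  intro L
  induction L with
  | nil => intro _; simp [pvSp]
  | cons x xs ih =>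
    intro hsub
    have hx : x ∈ D := hsub x (by simp)
    have hsub' : ∀ y ∈ xs, y ∈ D := fun y hy => hsub y (by simp [hy])
    have hpt : (fun k => ((x :: xs).count k).choose 2) =
        (fun k => (xs.count k).choose 2 + (if k = x then xs.count x else 0)) := by
      funext k
      by_cases hkx : k = x
      · subst hkx
        simp [List.count_cons_self, Nat.choose_succ_succ, Nat.choose_one_right, Nat.add_comm]
      · simp [hkx, show ¬x = k from fun h => hkx h.symm]
    rw [hpt, List.sum_map_add, ih hsub', pvSumIte x (xs.count x) D hD]
    simp [hx, pvSp, Nat.add_comm]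

theorem pvSpIndex (C : List Int) :
    ((List.range C.length).map (fun k => (C.drop (k + 1)).count (C.getD k 0))).sum = pvSp C := by
  induction C with
  | nil => simp [pvSp]
  | cons x xs ih =>
    rw [List.length_cons, List.range_succ_eq_map]
    simp only [List.map_cons, List.map_map, List.sum_cons]
    have h : (List.map ((fun k => ((x :: xs).drop (k + 1)).count ((x :: xs).getD k 0)) ∘ Nat.succ) (List.range xs.length))
        = List.map (fun k => (xs.drop (k + 1)).count (xs.getD k 0)) (List.range xs.length) := by
      apply List.map_congr_left; intro k _; simp
    rw [h, ih]; simp [pvSp]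

theorem pvFloordivChoose (m : Nat) :
    PySem.Int.floordiv ((m : Int) * ((m : Int) - 1)) 2 = ((m.choose 2 : Nat) : Int) := by
  cases m with
  | zero => decide
  | succ m' =>
    have h1 : ((m' + 1 : Nat) : Int) * (((m' + 1 : Nat) : Int) - 1) = (((m' + 1) * m' : Nat) : Int) := by
      push_cast; ring
    rw [h1]
    rw [show (2 : Int) = ((2 : Nat) : Int) from rfl, PySem.Int.floordiv_natCast]
    congr 1
    rw [Nat.choose_two_right]
    simp

-- B's counter-derived closed form equals pvSp of the counted list
theorem pvSamePairs (L : List Int) :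
    (((L.foldl (fun d lab => d.insert lab (d.getD lab 0 + 1)) PySem.Dict.empty).values).map
        (fun c => PySem.Int.floordiv (c * (c - 1)) 2)).sum = ((pvSp L : Nat) : Int) := by
  rw [PySem.Dict.foldl_insert_getD_add_one_eq_counter]
  have hv : (PySem.Dict.counter L).values = (PySem.Set.ofList L).map (fun k => ((L.count k : Nat) : Int)) := by
    simp [PySem.Dict.values, PySem.Dict.items_counter, List.map_map]
  rw [hv, List.map_map]
  have h : ((fun c => PySem.Int.floordiv (c * (c - 1)) 2) ∘ fun k => ((L.count k : Nat) : Int))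
      = fun k => (((L.count k).choose 2 : Nat) : Int) := by
    funext k; exact pvFloordivChoose (L.count k)
  rw [h]
  rw [← pvChooseSum (PySem.Set.ofList L) (PySem.Set.nodup_ofList L) L
        (fun x hx => (PySem.Set.mem_ofList L x).mpr hx)]
  rw [Nat.cast_list_sum, List.map_map]
  rfl

theorem pvInnerSum (C : List Int) (i : Int) (hi : 0 ≤ i) :
    ((PySem.List.pyRange (i + 1) ((C.length : Int)) 1).map
        (fun j => if PySem.List.pyGetD C i 0 == PySem.List.pyGetD C j 0 then (1 : Int) else 0)).sum
      = (((C.drop (i + 1).toNat).count (PySem.List.pyGetD C i 0) : Nat) : Int) := by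
  have hmap : (PySem.List.pyRange (i + 1) ((C.length : Int)) 1).map
        (fun j => if PySem.List.pyGetD C i 0 == PySem.List.pyGetD C j 0 then (1 : Int) else 0)
      = ((PySem.List.pyRange (i + 1) ((C.length : Int)) 1).map
          (fun j => PySem.List.pyGetD C j 0)).map
          (fun v => if PySem.List.pyGetD C i 0 == v then (1 : Int) else 0) := by
    rw [List.map_map]; rfl
  rw [hmap, PySem.List.map_pyGetD_pyRange' C 0 (by omega),
      PySem.List.sum_map_ite_one_zero (fun v => PySem.List.pyGetD C i 0 == v)]
  congr 1
  have h : (fun v => PySem.List.pyGetD C i 0 == v) = (fun v => v == PySem.List.pyGetD C i 0) := by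
    funext v; exact Bool.beq_comm
  rw [h, ← List.count_eq_countP]

theorem pvPairSum (C : List Int) :
    ((PySem.List.pyRange 0 ((C.length : Int)) 1).map (fun i =>
        ((PySem.List.pyRange (i + 1) ((C.length : Int)) 1).map
          (fun j => if PySem.List.pyGetD C i 0 == PySem.List.pyGetD C j 0 then (1 : Int) else 0)).sum)).sum
      = ((pvSp C : Nat) : Int) := by
  have h1 : (PySem.List.pyRange 0 ((C.length : Int)) 1).map (fun i =>
        ((PySem.List.pyRange (i + 1) ((C.length : Int)) 1).map
          (fun j => if PySem.List.pyGetD C i 0 == PySem.List.pyGetD C j 0 then (1 : Int) else 0)).sum)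
      = (List.range C.length).map (fun k => (((C.drop (k + 1)).count (C.getD k 0) : Nat) : Int)) := by
    rw [PySem.List.pyRange_zero_nat, List.map_map]
    apply List.map_congr_left
    intro k _
    simp only [Function.comp_apply]
    rw [pvInnerSum C (k : Int) (by omega)]
    have h2 : ((k : Int) + 1).toNat = k + 1 := by omega
    rw [h2, PySem.List.pyGetD_natCast]
  rw [h1, ← pvSpIndex C, Nat.cast_list_sum, List.map_map]
  rfl

-- generic loop shapes
theorem pvSumComb {α : Type} (l : List α) (f g h : α → Int) :
    (l.map (fun x => -(f x + g x - 2 * h x))).sum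
      = -((l.map f).sum + (l.map g).sum - 2 * (l.map h).sum) := by
  induction l with
  | nil => simp
  | cons x xs ih => simp only [List.map_cons, List.sum_cons, ih]; ring

theorem pvDoubleFold (n : Int) (g : Int → Int → Int) (init : Int) :
    (PySem.List.pyRange 0 n 1).foldl (fun s i =>
        (PySem.List.pyRange (i + 1) n 1).foldl (fun s j => s + g i j) s) init
      = init + ((PySem.List.pyRange 0 n 1).map (fun i =>
          ((PySem.List.pyRange (i + 1) n 1).map (g i)).sum)).sum := by
  have h : (fun (s i : Int) => (PySem.List.pyRange (i + 1) n 1).foldl (fun s j => s + g i j) s)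
      = (fun (s i : Int) => s + ((PySem.List.pyRange (i + 1) n 1).map (g i)).sum) := by
    funext s i; rw [PySem.List.foldl_add]
  rw [h, PySem.List.foldl_add]

theorem pvFoldPairAdd (l : List Int) (f g : Int → Int) (p : Int × Int) :
    l.foldl (fun ew j => (ew.1 + f j, ew.2 + g j)) p
      = (p.1 + (l.map f).sum, p.2 + (l.map g).sum) := by
  obtain ⟨a, b⟩ := p
  rw [PySem.List.foldl_prod_mk (fun x j => x + f j) (fun x j => x + g j)]
  simp only [PySem.List.foldl_add]

theorem pvDoubleFoldPair (n : Int) (g1 g2 : Int → Int → Int) (p : Int × Int) :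
    (PySem.List.pyRange 0 n 1).foldl (fun ew i =>
        (PySem.List.pyRange (i + 1) n 1).foldl (fun ew j => (ew.1 + g1 i j, ew.2 + g2 i j)) ew) p
      = (p.1 + ((PySem.List.pyRange 0 n 1).map (fun i => ((PySem.List.pyRange (i + 1) n 1).map (g1 i)).sum)).sum,
         p.2 + ((PySem.List.pyRange 0 n 1).map (fun i => ((PySem.List.pyRange (i + 1) n 1).map (g2 i)).sum)).sum) := by
  have h : (fun (ew : Int × Int) (i : Int) =>
        (PySem.List.pyRange (i + 1) n 1).foldl (fun ew j => (ew.1 + g1 i j, ew.2 + g2 i j)) ew)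
      = (fun (ew : Int × Int) (i : Int) =>
          (ew.1 + ((PySem.List.pyRange (i + 1) n 1).map (g1 i)).sum,
           ew.2 + ((PySem.List.pyRange (i + 1) n 1).map (g2 i)).sum)) := by
    funext ew i; rw [pvFoldPairAdd]
  rw [h, pvFoldPairAdd (PySem.List.pyRange 0 n 1)
        (fun i => ((PySem.List.pyRange (i + 1) n 1).map (g1 i)).sum)
        (fun i => ((PySem.List.pyRange (i + 1) n 1).map (g2 i)).sum) p]

-- reading an index below n through `take n`
theorem pvGetTake (cluster : List Int) (n : Nat) (i : Int) (h0 : 0 ≤ i) (h1 : i < (n : Int))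
    (hlen : n ≤ cluster.length) :
    PySem.List.pyGetD cluster i 0 = PySem.List.pyGetD (cluster.take n) i 0 := by
  rw [PySem.List.pyGetD_eq_getElem cluster 0 h0 (by omega),
      PySem.List.pyGetD_eq_getElem (cluster.take n) 0 h0
        (by rw [List.length_take]; push_cast; omega)]
  rw [List.getElem_take]

-- the main equivalence, under the length hypothesis the interesting cases provide
theorem pvMain (data : List (List Int)) (cluster : List Int)
    (hlen : data.length ≤ cluster.length) :
    fast_score data cluster = fast_score_alt data cluster := by
  unfold fast_score fast_score_alt
  simp only []
  set n : Int := (data.length : Int) with hn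
  set C : List Int := cluster.take data.length with hC
  have hClen : C.length = data.length := by rw [hC, List.length_take_of_le hlen]
  -- A as a double sum of pvGA
  have hA : (fun (score i : Int) =>
        (PySem.List.pyRange (i + 1) n 1).foldl (fun score j =>
          if PySem.List.pyGetD (PySem.List.pyGetD data i []) j 0 == 1 then
            (if PySem.List.pyGetD cluster i 0 != PySem.List.pyGetD cluster j 0 then score - 1 else score)
          else
            (if PySem.List.pyGetD cluster i 0 == PySem.List.pyGetD cluster j 0 then score - 1 else score))
          score)
      = (fun (score i : Int) =>
          (PySem.List.pyRange (i + 1) n 1).foldl (fun s j => s + pvGA data cluster i j) score) := by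
    funext score i
    congr 1
    funext s j
    by_cases hE : (PySem.List.pyGetD (PySem.List.pyGetD data i []) j 0 == 1) = true <;>
      by_cases hS : (PySem.List.pyGetD cluster i 0 == PySem.List.pyGetD cluster j 0) = true <;>
        simp [pvGA, pvE, pvS, hE, hS, bne] <;> ring
  rw [hA, pvDoubleFold]
  -- B's pair loop as two double sums
  have hB : (fun (ew : Int × Int) (i : Int) =>
        (PySem.List.pyRange (i + 1) n 1).foldl (fun ew j =>
          if PySem.List.pyGetD (PySem.List.pyGetD data i []) j 0 == 1 then
            (ew.1 + 1, if PySem.List.pyGetD cluster i 0 == PySem.List.pyGetD cluster j 0 then ew.2 + 1 else ew.2)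
          else ew) ew)
      = (fun (ew : Int × Int) (i : Int) =>
          (PySem.List.pyRange (i + 1) n 1).foldl
            (fun ew j => (ew.1 + pvF1 data i j, ew.2 + pvF2 data cluster i j)) ew) := by
    funext ew i
    congr 1
    funext ew j
    by_cases hE : (PySem.List.pyGetD (PySem.List.pyGetD data i []) j 0 == 1) = true <;>
      by_cases hS : (PySem.List.pyGetD cluster i 0 == PySem.List.pyGetD cluster j 0) = true <;>
        simp [pvF1, pvF2, pvE, pvS, hE, hS]
  rw [hB, pvDoubleFoldPair]
  -- pointwise, pvGA = -(pvF1 + pvG0 - 2*pvF2)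
  have hGA : ∀ i, pvGA data cluster i = (fun j =>
      -(pvF1 data i j + pvG0 cluster i j - 2 * pvF2 data cluster i j)) := by
    intro i; funext j
    by_cases hE : pvE data i j = true <;> by_cases hS : pvS cluster i j = true <;>
      simp [pvGA, pvF1, pvF2, pvG0, hE, hS]
  have hcomb : ((PySem.List.pyRange 0 n 1).map (fun i =>
        ((PySem.List.pyRange (i + 1) n 1).map (pvGA data cluster i)).sum)).sum
      = -(((PySem.List.pyRange 0 n 1).map (fun i =>
            ((PySem.List.pyRange (i + 1) n 1).map (pvF1 data i)).sum)).sum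
          + ((PySem.List.pyRange 0 n 1).map (fun i =>
            ((PySem.List.pyRange (i + 1) n 1).map (pvG0 cluster i)).sum)).sum
          - 2 * ((PySem.List.pyRange 0 n 1).map (fun i =>
            ((PySem.List.pyRange (i + 1) n 1).map (pvF2 data cluster i)).sum)).sum) := by
    rw [← pvSumComb]
    apply congrArg
    apply List.map_congr_left
    intro i _
    rw [hGA i, pvSumComb]
  rw [hcomb]
  -- the same-cluster double sum equals B's closed form
  have hslice : PySem.List.slice cluster none (some n) = C := by
    rw [hn, hC, PySem.List.slice_to_natCast]
  have hG0 : ((PySem.List.pyRange 0 n 1).map (fun i =>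
        ((PySem.List.pyRange (i + 1) n 1).map (pvG0 cluster i)).sum)).sum
      = (((PySem.List.slice cluster none (some n)).foldl
            (fun (d : PySem.Dict Int Int) (lab : Int) => d.insert lab (d.getD lab 0 + 1)) PySem.Dict.empty).values.map
            (fun c => PySem.Int.floordiv (c * (c - 1)) 2)).sum := by
    rw [hslice, pvSamePairs C]
    have hswap : (PySem.List.pyRange 0 n 1).map (fun i =>
          ((PySem.List.pyRange (i + 1) n 1).map (pvG0 cluster i)).sum)
        = (PySem.List.pyRange 0 ((C.length : Int)) 1).map (fun i =>
            ((PySem.List.pyRange (i + 1) ((C.length : Int)) 1).map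
              (fun j => if PySem.List.pyGetD C i 0 == PySem.List.pyGetD C j 0 then (1 : Int) else 0)).sum) := by
      rw [hClen, ← hn]
      apply List.map_congr_left
      intro i hi
      rw [PySem.List.mem_pyRange_one] at hi
      apply congrArg
      apply List.map_congr_left
      intro j hj
      rw [PySem.List.mem_pyRange_one] at hj
      unfold pvG0 pvS
      rw [pvGetTake cluster data.length i hi.1 (by omega) hlen,
          pvGetTake cluster data.length j (by omega) (by omega) hlen]
    rw [hswap, pvPairSum C]
  rw [hG0]
  ring
-- ===== VERDICT (by name: the statement is the Claim_ definition above) =====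
theorem fast_score_spec : Claim_equal_fast_score := by
  intro data cluster _ hpre
  unfold Spec_fast_score
  by_cases hc : data.length ≤ cluster.length
  · exact pvMain data cluster hc
  · have h2 : ¬ 2 ≤ data.length := fun h => hc (hpre h).1
    have hd1 : data.length ≤ 1 := by omega
    have hcl : cluster.length = 0 := by omega
    have hcl' : cluster = [] := List.eq_nil_of_length_eq_zero hcl
    subst hcl'
    match data, hd1 with
    | [], _ => decide
    | [row], _ =>
      simp [fast_score, fast_score_alt,
        show PySem.List.pyRange 0 1 1 = [0] from by decide,
        show PySem.List.slice ([] : List Int) none (some 1) = [] from by decide,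
        show (PySem.Dict.empty : PySem.Dict Int Int).values = [] from by decide]
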